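-- pv_equiv track=rewrite | github.com/ourSSUNG/algorithms | algorithms/heapsortWithkthLargestElement.py | heapInput
-- ===== SOURCE A (Python) =====
-- def heapInput(heap,num):
--     inputindex = len(heap)
--     heap.append(num)
--     while(True):
--         if inputindex == 0:
--             break
--         tmp =(inputindex+1)//2-1
--         if num > heap[tmp]:
--             tmp2 = num
--             heap[inputindex] = heap[tmp]
--             heap[tmp] = tmp2
--             inputindex = tmp
--         else:
--             break
--     return heap
-- ===== SOURCE B (Python) =====
-- def heapInput(heap, num):
--     heap.append(num)
--     _sift_up(heap, len(heap) - 1, num)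
--     return heap
--
-- def _sift_up(heap, i, num):
--     """Hole method: bubble the hole up recursively, write num once at the end."""
--     p = (i + 1) // 2 - 1
--     if i == 0 or heap[p] >= num:
--         heap[i] = num
--     else:
--         heap[i] = heap[p]
--         _sift_up(heap, p, num)
-- ===== Notes on version B (the rewrite author's own statement) =====
-- stated objective: alternative
-- what changed: Replaces A's iterative swap-at-each-step sift-up with a recursive hole-bubbling sift-up that moves each smaller parent down and writes num exactly once at its final position.
import Mathlib
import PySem

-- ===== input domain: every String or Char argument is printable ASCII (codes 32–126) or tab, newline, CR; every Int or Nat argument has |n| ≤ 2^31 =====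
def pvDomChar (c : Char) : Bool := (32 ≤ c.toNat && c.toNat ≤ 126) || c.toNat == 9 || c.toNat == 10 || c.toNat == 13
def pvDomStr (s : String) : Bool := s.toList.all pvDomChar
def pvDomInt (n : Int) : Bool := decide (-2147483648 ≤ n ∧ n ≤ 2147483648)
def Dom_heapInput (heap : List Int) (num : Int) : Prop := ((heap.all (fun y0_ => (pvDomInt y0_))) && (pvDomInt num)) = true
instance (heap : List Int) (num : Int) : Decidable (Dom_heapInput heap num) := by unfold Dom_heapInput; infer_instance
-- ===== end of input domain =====

-- B replaces A's iterative swap-at-each-step sift-up by a recursive hole-bubbling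
-- sift-up that writes num exactly once; equivalence is about the returned list
-- (both Pythons also mutate `heap` in place, identically).

-- ===== PORT A =====
-- the while loop of A: state is the list and inputindex; indices always in range,
-- so heap[tmp] is ported as getD (exact here)
def heapInputGo (h : List Int) (num : Int) (i : Nat) : List Int :=
  if i = 0 then h
  else
    let tmp := (i + 1) / 2 - 1
    if num > h.getD tmp 0 then
      heapInputGo ((h.set i (h.getD tmp 0)).set tmp num) num tmp
    else h
termination_by i
decreasing_by omega

def heapInput (heap : List Int) (num : Int) : List Int :=
  heapInputGo (heap ++ [num]) num heap.length

-- ===== PORT B =====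
-- recursive hole method: move smaller parents down, place num once at the end
def siftUpAlt (h : List Int) (i : Nat) (num : Int) : List Int :=
  let p := (i + 1) / 2 - 1
  if i = 0 ∨ h.getD p 0 ≥ num then h.set i num
  else siftUpAlt (h.set i (h.getD p 0)) p num
termination_by i
decreasing_by omega

def heapInput_alt (heap : List Int) (num : Int) : List Int :=
  siftUpAlt (heap ++ [num]) (heap ++ [num]).length.pred num

-- ===== PRECONDITION & SPEC =====
def Spec_heapInput (heap : List Int) (num : Int) (out : List Int) : Prop := out = heapInput_alt heap num
instance (heap : List Int) (num : Int) (out : List Int) : Decidable (Spec_heapInput heap num out) := by unfold Spec_heapInput; infer_instance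

-- ===== CLAIM (what is proved, stated in full; the proofs are below) =====
def Claim_equal_heapInput : Prop := ∀ (heap : List Int) (num : Int), Dom_heapInput heap num → Spec_heapInput heap num (heapInput heap num)

-- ===== LEMMAS AND PROOFS =====

lemma pv_set_getD_self (xs : List Int) (i : Nat) (hi : i < xs.length) :
    xs.set i (xs.getD i 0) = xs := by
  apply List.ext_getElem
  · simp
  · intro n h1 h2
    by_cases hn : n = i
    · subst hn
      simp [List.getD, List.getElem?_eq_getElem hi]
    · simp only [List.getElem_set]
      rw [if_neg (fun h => hn h.symm)]

-- key invariant: A's loop on a state where position i holds num equals B's sift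
lemma pv_key (i : Nat) : ∀ (X : List Int) (num : Int), i < X.length →
    heapInputGo (X.set i num) num i = siftUpAlt X i num := by
  induction i using Nat.strong_induction_on with
  | _ i ih =>
    intro X num hlen
    by_cases h0 : i = 0
    · subst h0
      rw [heapInputGo, siftUpAlt]
      simp
    · have hp : (i + 1) / 2 - 1 < i := by omega
      have hgd : (X.set i num).getD ((i + 1) / 2 - 1) 0 = X.getD ((i + 1) / 2 - 1) 0 := by
        simp [List.getD, List.getElem?_set_ne (by omega : i ≠ (i + 1) / 2 - 1)]
      rw [heapInputGo, siftUpAlt, if_neg h0]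
      simp only []
      rw [hgd]
      by_cases hcmp : num > X.getD ((i + 1) / 2 - 1) 0
      · rw [if_pos hcmp, if_neg (by omega : ¬ (i = 0 ∨ X.getD ((i + 1) / 2 - 1) 0 ≥ num)),
            List.set_set]
        -- A's recursion state is now (X'.set p num): apply the induction hypothesis
        exact ih _ hp (X.set i (X.getD ((i + 1) / 2 - 1) 0)) num
          (by rw [List.length_set]; omega)
      · rw [if_neg hcmp, if_pos (Or.inr (by omega))]

-- ===== VERDICT (by name: the statement is the Claim_ definition above) =====
theorem heapInput_spec : Claim_equal_heapInput := by
  intro heap num _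
  unfold Spec_heapInput heapInput heapInput_alt
  have hlen : heap.length < (heap ++ [num]).length := by simp
  have hnum : (heap ++ [num]).getD heap.length 0 = num := by
    simp [List.getD]
  have hself : (heap ++ [num]).set heap.length num = heap ++ [num] := by
    have h := pv_set_getD_self (heap ++ [num]) heap.length hlen
    rw [hnum] at h; exact h
  have hpred : (heap ++ [num]).length.pred = heap.length := by simp
  rw [hpred]
  conv_lhs => rw [← hself]
  exact pv_key heap.length (heap ++ [num]) num hlen
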